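-- pv_equiv track=rewrite | github.com/Banagher-Links-UC0096/Python_test | smartmeter_monthly_stack_v2.2.9.py | hour_to_band
-- ===== SOURCE A (Python) =====
-- TIME_BANDS = {
--     'day': {
--         'hours': list(range(9, 17)),  # デイタイム9時～17時
--         'color': '#FFEB99',
--         'color_rgb': (1.0, 0.92, 0.6),
--         'label': 'デイタイム(平日:9-17時)'
--     },
--     'home': {
--         'hours': list(range(7, 9)) + list(range(17, 23)),  # ホームタイム7-9時,17-23時
--         'color': '#99E699',
--         'color_rgb': (0.6, 0.9, 0.6),
--         'label': 'ホームタイム(平日:7-9,17-23時\n※土日祝は9-17も含む)'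
--     },
--     'night': {
--         'hours': list(range(23, 24)) + list(range(0, 7)),  # ナイトタイム23時-7時
--         'color': '#99CCFF',
--         'color_rgb': (0.6, 0.8, 1.0),
--         'label': 'ナイトタイム(23,0-7時)'
--     }
-- }
--
-- def hour_to_band(hour: int, is_holiday_flag: bool) -> str:
--     """時間 (0-23) を受け取り、休日フラグに応じて 'day'/'home'/'night' を返す。"""
--     try:
--         h = int(hour) % 24
--     except Exception:
--         return 'night'
--     if is_holiday_flag:
--         # 休日は 'home' の時間帯が拡張される
--         if h in TIME_BANDS['home']['hours'] or h in TIME_BANDS['day']['hours']: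
--             return 'home'
--         else:
--             return 'night'
--     # 平日
--     for band, info in TIME_BANDS.items():
--         if h in info['hours']:
--             return band
--     return 'night'
-- ===== SOURCE B (Python) =====
-- def hour_to_band(hour: int, is_holiday_flag: bool) -> str:
--     """時間 (0-23) を受け取り、休日フラグに応じて 'day'/'home'/'night' を返す。"""
--     try:
--         h = int(hour) % 24
--     except Exception:
--         return 'night'
--     if is_holiday_flag:
--         return 'home' if 7 <= h < 23 else 'night'
--     if 9 <= h < 17:
--         return 'day'
--     if 7 <= h < 9 or 17 <= h < 23:
--         return 'home'
--     return 'night'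
-- ===== Notes on version B (the rewrite author's own statement) =====
-- stated objective: simpler
-- what changed: Replaces the TIME_BANDS table lookup and membership-scan loop with direct closed-form range comparisons on the hour.
import Mathlib
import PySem

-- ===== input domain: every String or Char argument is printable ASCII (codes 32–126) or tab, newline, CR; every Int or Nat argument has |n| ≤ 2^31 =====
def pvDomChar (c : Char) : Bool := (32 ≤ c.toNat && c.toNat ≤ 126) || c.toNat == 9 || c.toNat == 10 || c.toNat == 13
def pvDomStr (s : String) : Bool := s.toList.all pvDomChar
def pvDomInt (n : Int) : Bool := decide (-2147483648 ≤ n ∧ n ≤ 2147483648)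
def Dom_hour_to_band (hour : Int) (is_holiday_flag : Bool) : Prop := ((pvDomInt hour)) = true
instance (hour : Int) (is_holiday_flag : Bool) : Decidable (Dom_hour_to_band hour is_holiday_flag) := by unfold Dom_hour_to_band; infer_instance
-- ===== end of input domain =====

-- B replaces A's TIME_BANDS membership-scan loop with direct range comparisons on the hour (objective: simpler).


-- ===== PORT A =====
-- list(range(9,17)), list(range(7,9))+list(range(17,23)), list(range(23,24))+list(range(0,7))
def pvDayHours : List Int := PySem.List.pyRange 9 17 1
def pvHomeHours : List Int := PySem.List.pyRange 7 9 1 ++ PySem.List.pyRange 17 23 1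
def pvNightHours : List Int := PySem.List.pyRange 23 24 1 ++ PySem.List.pyRange 0 7 1
-- the weekday 'for band, info in TIME_BANDS.items()' loop
def pvBandLoop (h : Int) : List (String × List Int) → String
  | [] => "night"
  | (band, hours) :: rest => if hours.contains h then band else pvBandLoop h rest
-- body of A after 'h = int(hour) % 24' (int(hour) cannot raise on an Int input)
def pvBodyA (h : Int) (is_holiday_flag : Bool) : String :=
  if is_holiday_flag then
    if pvHomeHours.contains h || pvDayHours.contains h then "home" else "night"
  else
    pvBandLoop h [("day", pvDayHours), ("home", pvHomeHours), ("night", pvNightHours)]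
def hour_to_band (hour : Int) (is_holiday_flag : Bool) : String :=
  pvBodyA (PySem.Int.mod hour 24) is_holiday_flag

-- ===== PORT B =====
-- B: same prologue, then direct range comparisons (simpler; no table)
def pvBodyB (h : Int) (is_holiday_flag : Bool) : String :=
  if is_holiday_flag then
    if 7 ≤ h ∧ h < 23 then "home" else "night"
  else if 9 ≤ h ∧ h < 17 then "day"
  else if (7 ≤ h ∧ h < 9) ∨ (17 ≤ h ∧ h < 23) then "home"
  else "night"
def hour_to_band_alt (hour : Int) (is_holiday_flag : Bool) : String :=
  pvBodyB (PySem.Int.mod hour 24) is_holiday_flag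

-- ===== PRECONDITION & SPEC =====
def Spec_hour_to_band (hour : Int) (is_holiday_flag : Bool) (out : String) : Prop := out = hour_to_band_alt hour is_holiday_flag
instance (hour : Int) (is_holiday_flag : Bool) (out : String) : Decidable (Spec_hour_to_band hour is_holiday_flag out) := by unfold Spec_hour_to_band; infer_instance

-- ===== CLAIM (what is proved, stated in full; the proofs are below) =====
def Claim_equal_hour_to_band : Prop := ∀ (hour : Int) (is_holiday_flag : Bool), Dom_hour_to_band hour is_holiday_flag → Spec_hour_to_band hour is_holiday_flag (hour_to_band hour is_holiday_flag)

-- ===== LEMMAS AND PROOFS =====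

-- ===== VERDICT (by name: the statement is the Claim_ definition above) =====
theorem pvBody_agree : ∀ (h : Int), 0 ≤ h → h < 24 → ∀ (f : Bool), pvBodyA h f = pvBodyB h f := by
  intro h h0 h24 f
  interval_cases h <;> cases f <;> decide

theorem hour_to_band_spec : Claim_equal_hour_to_band := by
  intro hour f _
  unfold Spec_hour_to_band hour_to_band hour_to_band_alt
  have h24 : (0:Int) < 24 := by norm_num
  rw [PySem.Int.mod_eq_emod_of_pos h24]
  exact pvBody_agree _ (Int.emod_nonneg hour (by norm_num)) (Int.emod_lt_of_pos hour h24) f
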